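-- pv_equiv track=rewrite | github.com/AFrenchWrench/Computer-101 | matrix_calc.py | matrix_max
-- ===== SOURCE A (Python) =====
-- def matrix_max(matrix: list[list[int]]) -> tuple[int]:
--     """
--     Args:
--         matrix (list): a matrix
--     Returns:
--         tuple:
--             the max of the matrix's elements,
--             the max of the main diagonal,
--             the max of the elements top of the main diagonal,
--             the max of the elements bottom of the main diagonal
--     """
--     whole_max = 0
--     diagonal_max = 0
--     top_max = 0
--     bottom_max = 0
--
--     for index1, i in enumerate(matrix):
--         for index2, j in enumerate(i):
--             whole_max = max(whole_max, j)
--             if index1 == index2: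
--                 diagonal_max = max(diagonal_max, j)
--             if index1 < index2:
--                 top_max = max(top_max, j)
--             if index1 > index2:
--                 bottom_max = max(bottom_max, j)
--
--     return whole_max, diagonal_max, top_max, bottom_max
-- ===== SOURCE B (Python) =====
-- def matrix_max(matrix):
--     cells = [(i, j, v) for i, row in enumerate(matrix) for j, v in enumerate(row)]
--     whole = max([0] + [v for i, j, v in cells])
--     diagonal = max([0] + [v for i, j, v in cells if i == j])
--     top = max([0] + [v for i, j, v in cells if i < j])
--     bottom = max([0] + [v for i, j, v in cells if i > j])
--     return whole, diagonal, top, bottom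
-- ===== Notes on version B (the rewrite author's own statement) =====
-- stated objective: simpler
-- what changed: Replaces the single stateful branchy nested loop with a flat cell list and four independent filtered maxima seeded with 0.
import Mathlib
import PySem

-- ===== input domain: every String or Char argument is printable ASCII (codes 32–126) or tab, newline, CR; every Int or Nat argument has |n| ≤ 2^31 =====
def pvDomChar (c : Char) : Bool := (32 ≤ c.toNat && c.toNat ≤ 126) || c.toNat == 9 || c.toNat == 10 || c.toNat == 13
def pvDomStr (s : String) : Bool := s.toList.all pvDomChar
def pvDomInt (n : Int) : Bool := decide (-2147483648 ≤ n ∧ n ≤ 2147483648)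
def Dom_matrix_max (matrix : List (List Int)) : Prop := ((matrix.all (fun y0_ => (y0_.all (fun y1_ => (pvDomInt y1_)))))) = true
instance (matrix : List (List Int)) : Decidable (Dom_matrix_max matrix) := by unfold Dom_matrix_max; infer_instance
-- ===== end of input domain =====

-- B replaces A's single stateful branchy nested loop by a flat cell list and four
-- independent filtered maxima, each seeded with 0 (objective: simpler decomposition).

-- ===== PORT A =====
-- literal port of A: one nested enumerate loop carrying the running 4-tuple state
def matrix_max (matrix : List (List Int)) : Int × Int × Int × Int :=
  (PySem.List.enumerate matrix 0).foldl (fun s p =>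
    (PySem.List.enumerate p.2 0).foldl (fun s q =>
      let s1 := (max s.1 q.2, s.2.1, s.2.2.1, s.2.2.2)
      let s2 := if p.1 == q.1 then (s1.1, max s1.2.1 q.2, s1.2.2.1, s1.2.2.2) else s1
      let s3 := if p.1 < q.1 then (s2.1, s2.2.1, max s2.2.2.1 q.2, s2.2.2.2) else s2
      if p.1 > q.1 then (s3.1, s3.2.1, s3.2.2.1, max s3.2.2.2 q.2) else s3) s)
    (0, 0, 0, 0)

-- ===== PORT B =====
-- literal port of B: build the flat (i, j, v) cell list, then four filtered maxima
def matrix_max_alt (matrix : List (List Int)) : Int × Int × Int × Int :=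
  let cells := (PySem.List.enumerate matrix 0).flatMap (fun p =>
    (PySem.List.enumerate p.2 0).map (fun q => (p.1, q.1, q.2)))
  let whole := ((cells.map (fun c => c.2.2)).foldl max 0)
  let diagonal := (((cells.filter (fun c => c.1 == c.2.1)).map (fun c => c.2.2)).foldl max 0)
  let top := (((cells.filter (fun c => c.1 < c.2.1)).map (fun c => c.2.2)).foldl max 0)
  let bottom := (((cells.filter (fun c => decide (c.1 > c.2.1))).map (fun c => c.2.2)).foldl max 0)
  (whole, diagonal, top, bottom)

-- ===== PRECONDITION & SPEC =====
def Spec_matrix_max (matrix : List (List Int)) (out : Int × Int × Int × Int) : Prop := out = matrix_max_alt matrix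
instance (matrix : List (List Int)) (out : Int × Int × Int × Int) : Decidable (Spec_matrix_max matrix out) := by unfold Spec_matrix_max; infer_instance

-- ===== CLAIM (what is proved, stated in full; the proofs are below) =====
def Claim_equal_matrix_max : Prop := ∀ (matrix : List (List Int)), Dom_matrix_max matrix → Spec_matrix_max matrix (matrix_max matrix)

-- ===== LEMMAS AND PROOFS =====

-- A's per-cell step, on flat (i, j, v) cells
def pvStep (s : Int × Int × Int × Int) (c : Int × Int × Int) : Int × Int × Int × Int :=
  let s1 := (max s.1 c.2.2, s.2.1, s.2.2.1, s.2.2.2)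
  let s2 := if c.1 == c.2.1 then (s1.1, max s1.2.1 c.2.2, s1.2.2.1, s1.2.2.2) else s1
  let s3 := if c.1 < c.2.1 then (s2.1, s2.2.1, max s2.2.2.1 c.2.2, s2.2.2.2) else s2
  if c.1 > c.2.1 then (s3.1, s3.2.1, s3.2.2.1, max s3.2.2.2 c.2.2) else s3

-- the combined fold computes the four filtered maxima componentwise
theorem pvStep_foldl (cells : List (Int × Int × Int)) (w d t b : Int) :
    cells.foldl pvStep (w, d, t, b) =
      ((cells.map (fun c => c.2.2)).foldl max w,
       ((cells.filter (fun c => c.1 == c.2.1)).map (fun c => c.2.2)).foldl max d,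
       ((cells.filter (fun c => c.1 < c.2.1)).map (fun c => c.2.2)).foldl max t,
       ((cells.filter (fun c => decide (c.1 > c.2.1))).map (fun c => c.2.2)).foldl max b) := by
  induction cells generalizing w d t b with
  | nil => rfl
  | cons c cs ih =>
    simp only [List.foldl_cons, List.map_cons, List.filter_cons]
    rw [show cs.foldl pvStep (pvStep (w, d, t, b) c) = _ from rfl]
    by_cases h1 : c.1 = c.2.1
    · simp [pvStep, h1, ih]
    · by_cases h2 : c.1 < c.2.1
      · have h3 : ¬ c.1 > c.2.1 := by omega
        simp [pvStep, h1, h2, h3, ih]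
      · have h3 : c.1 > c.2.1 := by omega
        simp [pvStep, h1, h2, h3, ih]

-- A's nested fold is the fold of pvStep over the flat cell list
theorem pvA_eq_cells (matrix : List (List Int)) :
    matrix_max matrix =
      ((PySem.List.enumerate matrix 0).flatMap (fun p =>
        (PySem.List.enumerate p.2 0).map (fun q => (p.1, q.1, q.2)))).foldl pvStep (0, 0, 0, 0) := by
  rw [List.foldl_flatMap]
  unfold matrix_max
  apply PySem.List.foldl_congr_mem
  intro s p _
  rw [List.foldl_map]
  rfl

-- ===== VERDICT (by name: the statement is the Claim_ definition above) =====
theorem matrix_max_spec : Claim_equal_matrix_max := by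
  intro matrix _
  unfold Spec_matrix_max matrix_max_alt
  rw [pvA_eq_cells, pvStep_foldl]
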